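-- pv_equiv track=rewrite | github.com/filipjeremic/hackerrank | Algorithms/A or B/solution.py | get_mandatory_changes
-- ===== SOURCE A (Python) =====
-- def int_bit(value: int, mask: int):
--     return 1 if (value & mask) > 0 else 0
--
-- def get_mandatory_changes(a: int, b: int, c: int) -> tuple:
--     total_change_count = 0
--     new_a = 0
--     new_b = 0
--
--     i = 8
--     while i > 0:
--         a_bit = int_bit(a, i)
--         b_bit = int_bit(b, i)
--         c_bit = int_bit(c, i)
--
--         i >>= 1
--
--         change_count = ((c_bit ^ 1) * (a_bit + b_bit)) + (c_bit * ((a_bit | b_bit) ^ 1))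
--
--         total_change_count += change_count
--         new_a = (new_a << 1) | (c_bit * a_bit)
--         new_b = (new_b << 1) | (c_bit * (b_bit + change_count))
--
--     return (total_change_count, new_a, new_b)
-- ===== SOURCE B (Python) =====
-- def get_mandatory_changes(a: int, b: int, c: int) -> tuple:
--     a &= 0b1111
--     b &= 0b1111
--     c &= 0b1111
--     not_a = a ^ 0b1111
--     not_c = c ^ 0b1111
--     new_a = a & c
--     new_b = c & (b | not_a)
--     total_change_count = (
--         bin(a & not_c).count("1")
--         + bin(b & not_c).count("1")
--         + bin(c & not_a & (b ^ 0b1111)).count("1")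
--     )
--     return (total_change_count, new_a, new_b)
-- ===== Notes on version B (the rewrite author's own statement) =====
-- stated objective: idiomatic
-- what changed: Replaces the per-bit while loop (4 iterations extracting bits with int_bit and rebuilding accumulators by shift-or) with loop-free bit-parallel operations on the masked low 4 bits: new_a = a&c, new_b = c&(b|~a), and the change count as three popcounts of masked bit patterns.
import Mathlib
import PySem

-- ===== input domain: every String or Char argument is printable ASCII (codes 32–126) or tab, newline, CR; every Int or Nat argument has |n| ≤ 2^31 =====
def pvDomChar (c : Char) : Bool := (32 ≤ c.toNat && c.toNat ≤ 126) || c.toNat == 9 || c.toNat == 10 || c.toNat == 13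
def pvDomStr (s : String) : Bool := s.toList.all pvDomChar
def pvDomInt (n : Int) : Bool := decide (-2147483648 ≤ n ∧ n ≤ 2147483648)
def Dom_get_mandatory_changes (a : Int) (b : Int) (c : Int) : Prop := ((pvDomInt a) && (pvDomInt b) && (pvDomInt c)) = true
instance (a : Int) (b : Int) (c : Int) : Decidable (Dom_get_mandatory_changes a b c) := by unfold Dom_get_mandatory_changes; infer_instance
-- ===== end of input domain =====

-- B replaces A's per-bit while loop by bit-parallel closed-form operations on the masked low 4 bits (idiomatic, loop-free); equivalence proved for all ints.

-- ===== PORT A =====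
-- int_bit(value, mask) = 1 if (value & mask) > 0 else 0
def int_bit (value : Int) (mask : Int) : Int :=
  if PySem.Int.band value mask > 0 then 1 else 0

-- the while loop of A; `fuel` is an extra guard making the recursion structural
-- (always called with fuel ≥ number of iterations, so it never cuts the loop short)
def pvLoopA (a : Int) (b : Int) (c : Int) : Nat → Int → Int → Int → Int → Int × Int × Int
  | 0, _, tc, na, nb => (tc, na, nb)
  | fuel + 1, i, tc, na, nb =>
    if i > 0 then
      let a_bit := int_bit a i
      let b_bit := int_bit b i
      let c_bit := int_bit c i
      let i' := i >>> (1 : Nat)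
      let change_count := ((PySem.Int.bxor c_bit 1) * (a_bit + b_bit)) + (c_bit * (PySem.Int.bxor (PySem.Int.bor a_bit b_bit) 1))
      pvLoopA a b c fuel i' (tc + change_count) (PySem.Int.bor (na <<< (1 : Nat)) (c_bit * a_bit)) (PySem.Int.bor (nb <<< (1 : Nat)) (c_bit * (b_bit + change_count)))
    else (tc, na, nb)

def get_mandatory_changes (a : Int) (b : Int) (c : Int) : Int × Int × Int :=
  pvLoopA a b c 8 8 0 0 0

-- ===== PORT B =====
def get_mandatory_changes_alt (a : Int) (b : Int) (c : Int) : Int × Int × Int :=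
  let a := PySem.Int.band a 15
  let b := PySem.Int.band b 15
  let c := PySem.Int.band c 15
  let not_a := PySem.Int.bxor a 15
  let not_c := PySem.Int.bxor c 15
  let new_a := PySem.Int.band a c
  let new_b := PySem.Int.band c (PySem.Int.bor b not_a)
  let total_change_count : Int :=
    ↑(PySem.Int.bitCount (PySem.Int.band a not_c))
    + ↑(PySem.Int.bitCount (PySem.Int.band b not_c))
    + ↑(PySem.Int.bitCount (PySem.Int.band (PySem.Int.band c not_a) (PySem.Int.bxor b 15)))
  (total_change_count, new_a, new_b)

-- ===== PRECONDITION & SPEC =====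
def Spec_get_mandatory_changes (a : Int) (b : Int) (c : Int) (out : Int × Int × Int) : Prop := out = get_mandatory_changes_alt a b c
instance (a : Int) (b : Int) (c : Int) (out : Int × Int × Int) : Decidable (Spec_get_mandatory_changes a b c out) := by unfold Spec_get_mandatory_changes; infer_instance

-- ===== CLAIM (what is proved, stated in full; the proofs are below) =====
def Claim_equal_get_mandatory_changes : Prop := ∀ (a : Int) (b : Int) (c : Int), Dom_get_mandatory_changes a b c → Spec_get_mandatory_changes a b c (get_mandatory_changes a b c)

-- ===== LEMMAS AND PROOFS =====

-- low-4-bit congruence for Nat &&& with a mask below 16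
theorem pv_nat_low (t n : Nat) (hn : n < 16) : t &&& n = (t % 16) &&& n := by
  apply Nat.eq_of_testBit_eq
  intro i
  simp only [Nat.testBit_and]
  rcases lt_or_ge i 4 with h4 | h4
  · have : (t % 16).testBit i = t.testBit i := by
      have : (16 : Nat) = 2 ^ 4 := by norm_num
      rw [this, Nat.testBit_mod_two_pow]
      simp [h4]
    rw [this]
  · have hnb : n.testBit i = false := by
      apply Nat.testBit_eq_false_of_lt
      calc n < 16 := hn
        _ = 2 ^ 4 := by norm_num
        _ ≤ 2 ^ i := Nat.pow_le_pow_right (by norm_num) h4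
    simp [hnb]

-- PySem.Int.band with a mask below 16 only sees the residue mod 16
theorem pv_band_mask (x : Int) (n : Nat) (hn : n < 16) :
    PySem.Int.band x ↑n = ↑(((x % 16).toNat) &&& n) := by
  by_cases hx : 0 ≤ x
  · rw [PySem.Int.band_of_nonneg hx (by positivity)]
    have h1 : (↑n : Int).toNat = n := by omega
    have h2 : (x % 16).toNat = x.toNat % 16 := by omega
    rw [h1, h2, ← pv_nat_low _ _ hn]
  · have hn0 : (0 : Int) ≤ ↑n := by positivity
    rw [PySem.Int.band, if_neg hx, if_pos hn0]
    have h1 : (↑n : Int).toNat = n := by omega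
    set m := (-x - 1).toNat with hm
    have hr : (x % 16).toNat = 15 - m % 16 := by omega
    rw [h1, hr]
    congr 1
    have hswap : n &&& m = n &&& (m % 16) := by
      rw [Nat.and_comm n m, pv_nat_low m n hn, Nat.and_comm]
    rw [hswap]
    have fin : ∀ s, s < 16 → ∀ k, k < 16 → k - (k &&& s) = (15 - s) &&& k := by decide
    exact fin (m % 16) (by omega) n hn

theorem pv_int_bit_congr (x : Int) (m : Int) (hm0 : 0 ≤ m) (hm : m < 16) :
    int_bit x m = int_bit ↑((x % 16).toNat) m := by
  have hmn : m = ↑m.toNat := by omega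
  have hlt : m.toNat < 16 := by omega
  have hr : ((↑((x % 16).toNat) : Int) % 16).toNat = (x % 16).toNat := by omega
  unfold int_bit
  rw [hmn, pv_band_mask x m.toNat hlt, pv_band_mask (↑((x % 16).toNat)) m.toNat hlt, hr]

-- the loop only depends on its arguments through their residues mod 16 (for masks i < 16)
theorem pv_loop_congr (a b c : Int) (fuel : Nat) :
    ∀ (i tc na nb : Int), 0 ≤ i → i < 16 →
    pvLoopA a b c fuel i tc na nb
      = pvLoopA ↑((a % 16).toNat) ↑((b % 16).toNat) ↑((c % 16).toNat) fuel i tc na nb := by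
  induction fuel with
  | zero => intro i tc na nb _ _; rfl
  | succ fuel ih =>
    intro i tc na nb h0 h16
    by_cases hi : i > 0
    · rw [pvLoopA, pvLoopA, if_pos hi, if_pos hi]
      simp only
      rw [← pv_int_bit_congr a i h0 h16, ← pv_int_bit_congr b i h0 h16, ← pv_int_bit_congr c i h0 h16]
      have hs : i >>> (1 : Nat) = i / 2 := by
        rw [Int.shiftRight_eq_div_pow]; norm_num
      apply ih <;> omega
    · rw [pvLoopA, pvLoopA, if_neg hi, if_neg hi]

theorem pv_key : ∀ (ra : Nat), ra < 16 → ∀ (rb : Nat), rb < 16 → ∀ (rc : Nat), rc < 16 →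
    get_mandatory_changes ↑ra ↑rb ↑rc = get_mandatory_changes_alt ↑ra ↑rb ↑rc := by
  decide

-- ===== VERDICT (by name: the statement is the Claim_ definition above) =====
theorem pv_band15_congr (x : Int) : PySem.Int.band x 15 = PySem.Int.band ↑((x % 16).toNat) 15 := by
  have h15 : (15 : Int) = ((15 : Nat) : Int) := rfl
  have hr : ((↑((x % 16).toNat) : Int) % 16).toNat = (x % 16).toNat := by omega
  rw [h15, pv_band_mask x 15 (by norm_num), pv_band_mask (↑((x % 16).toNat)) 15 (by norm_num), hr]

theorem get_mandatory_changes_spec : Claim_equal_get_mandatory_changes := by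
  intro a b c _
  unfold Spec_get_mandatory_changes
  have hra : (a % 16).toNat < 16 := by omega
  have hrb : (b % 16).toNat < 16 := by omega
  have hrc : (c % 16).toNat < 16 := by omega
  have hA : get_mandatory_changes a b c
      = get_mandatory_changes ↑((a % 16).toNat) ↑((b % 16).toNat) ↑((c % 16).toNat) := by
    unfold get_mandatory_changes
    exact pv_loop_congr a b c 8 8 0 0 0 (by norm_num) (by norm_num)
  have hB : get_mandatory_changes_alt a b c
      = get_mandatory_changes_alt ↑((a % 16).toNat) ↑((b % 16).toNat) ↑((c % 16).toNat) := by
    simp only [get_mandatory_changes_alt, pv_band15_congr a, pv_band15_congr b, pv_band15_congr c]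
  rw [hA, hB]
  exact pv_key _ hra _ hrb _ hrc
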